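-- pv_equiv track=rewrite | github.com/Arsenicophe/pos-tagger-hmm-viterbi | app.py | assign_unk
-- ===== SOURCE A (Python) =====
-- import string
--
-- PUNCT = set(string.punctuation)
--
-- NOUN_SUFFIX = ["action", "age", "ance", "cy", "dom", "ee", "ence", "er",
--                "hood", "ion", "ism", "ist", "ity", "ling", "ment", "ness",
--                "or", "ry", "scape", "ship", "ty"]
--
-- VERB_SUFFIX = ["ate", "ify", "ise", "ize"]
--
-- ADJ_SUFFIX = ["able", "ese", "ful", "i", "ian", "ible", "ic", "ish",
--               "ive", "less", "ly", "ous"]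
--
-- ADV_SUFFIX = ["ward", "wards", "wise"]
--
-- def assign_unk(tok):
--     """Assigne un token inconnu selon la morphologie du mot."""
--     if any(c.isdigit() for c in tok):
--         return "--unk_digit--"
--     elif any(c in PUNCT for c in tok):
--         return "--unk_punct--"
--     elif any(c.isupper() for c in tok):
--         return "--unk_upper--"
--     elif any(tok.endswith(s) for s in NOUN_SUFFIX):
--         return "--unk_noun--"
--     elif any(tok.endswith(s) for s in VERB_SUFFIX):
--         return "--unk_verb--"
--     elif any(tok.endswith(s) for s in ADJ_SUFFIX):
--         return "--unk_adj--"
--     elif any(tok.endswith(s) for s in ADV_SUFFIX):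
--         return "--unk_adv--"
--     return "--unk--"
-- ===== SOURCE B (Python) =====
-- import string
--
-- _PUNCT = set(string.punctuation)
--
-- _TAGS = ["--unk_digit--", "--unk_punct--", "--unk_upper--",
--          "--unk_noun--", "--unk_verb--", "--unk_adj--", "--unk_adv--", "--unk--"]
--
-- _SUFFIX_RANK = (
--     [(s, 3) for s in ["action", "age", "ance", "cy", "dom", "ee", "ence", "er",
--                       "hood", "ion", "ism", "ist", "ity", "ling", "ment", "ness",
--                       "or", "ry", "scape", "ship", "ty"]]
--     + [(s, 4) for s in ["ate", "ify", "ise", "ize"]]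
--     + [(s, 5) for s in ["able", "ese", "ful", "i", "ian", "ible", "ic", "ish",
--                         "ive", "less", "ly", "ous"]]
--     + [(s, 6) for s in ["ward", "wards", "wise"]]
-- )
--
-- def _char_rank(c):
--     if c.isdigit():
--         return 0
--     if c in _PUNCT:
--         return 1
--     if c.isupper():
--         return 2
--     return 7
--
-- def assign_unk(tok):
--     """Assigne un token inconnu selon la morphologie du mot."""
--     # branch-free severity: min-reduce character ranks and matching suffix ranks,
--     # then index the tag table (priority order is encoded in the rank numbers)
--     sev = 7
--     for c in tok:
--         sev = min(sev, _char_rank(c))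
--     for s, r in _SUFFIX_RANK:
--         if tok.endswith(s):
--             sev = min(sev, r)
--     return _TAGS[sev]
-- ===== Notes on version B (the rewrite author's own statement) =====
-- stated objective: alternative
-- what changed: B replaces A's ordered elif chain of any() scans by a numeric severity computation: each character and each matching suffix contributes a rank (0..6, priority-encoded), a min-reduction picks the smallest rank, and the tag is read off an indexed table, with no branches or early returns.
import Mathlib
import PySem

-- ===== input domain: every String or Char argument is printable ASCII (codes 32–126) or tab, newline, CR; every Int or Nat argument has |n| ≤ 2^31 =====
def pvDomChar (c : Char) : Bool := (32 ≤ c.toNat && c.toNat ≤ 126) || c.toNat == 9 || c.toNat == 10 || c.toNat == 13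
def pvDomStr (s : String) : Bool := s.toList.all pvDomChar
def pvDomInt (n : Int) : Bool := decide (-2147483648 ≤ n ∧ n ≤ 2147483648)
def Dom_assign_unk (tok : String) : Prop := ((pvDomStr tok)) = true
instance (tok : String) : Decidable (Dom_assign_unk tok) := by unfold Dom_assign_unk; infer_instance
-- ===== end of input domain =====

-- B replaces the ordered elif chain by a numeric severity: a min-reduction of per-character
-- ranks and of matching-suffix ranks, then a tag-table lookup (alternative decomposition).

-- module-level constants shared by both programs
def pvPunct : List Char := "!\"#$%&'()*+,-./:;<=>?@[\\]^_`{|}~".toList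

def pvNounSuffix : List String := ["action", "age", "ance", "cy", "dom", "ee", "ence", "er",
  "hood", "ion", "ism", "ist", "ity", "ling", "ment", "ness", "or", "ry", "scape", "ship", "ty"]

def pvVerbSuffix : List String := ["ate", "ify", "ise", "ize"]

def pvAdjSuffix : List String := ["able", "ese", "ful", "i", "ian", "ible", "ic", "ish",
  "ive", "less", "ly", "ous"]

def pvAdvSuffix : List String := ["ward", "wards", "wise"]

-- ===== PORT A =====
def assign_unk (tok : String) : String :=
  if tok.toList.any PySem.Chars.isdigit then "--unk_digit--"
  else if tok.toList.any (fun c => decide (c ∈ pvPunct)) then "--unk_punct--"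
  else if tok.toList.any PySem.Chars.isupper then "--unk_upper--"
  else if pvNounSuffix.any (fun s => PySem.Str.endswith tok s) then "--unk_noun--"
  else if pvVerbSuffix.any (fun s => PySem.Str.endswith tok s) then "--unk_verb--"
  else if pvAdjSuffix.any (fun s => PySem.Str.endswith tok s) then "--unk_adj--"
  else if pvAdvSuffix.any (fun s => PySem.Str.endswith tok s) then "--unk_adv--"
  else "--unk--"

-- ===== PORT B =====
def pvTags : List String := ["--unk_digit--", "--unk_punct--", "--unk_upper--",
  "--unk_noun--", "--unk_verb--", "--unk_adj--", "--unk_adv--", "--unk--"]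

def pvSuffixRank : List (String × Nat) :=
  pvNounSuffix.map (fun s => (s, 3))
  ++ pvVerbSuffix.map (fun s => (s, 4))
  ++ pvAdjSuffix.map (fun s => (s, 5))
  ++ pvAdvSuffix.map (fun s => (s, 6))

def pvCharRank (c : Char) : Nat :=
  if PySem.Chars.isdigit c then 0
  else if c ∈ pvPunct then 1
  else if PySem.Chars.isupper c then 2
  else 7

def assign_unk_alt (tok : String) : String :=
  let sev1 := tok.toList.foldl (fun sev c => min sev (pvCharRank c)) 7
  let sev := pvSuffixRank.foldl
    (fun sev p => if PySem.Str.endswith tok p.1 then min sev p.2 else sev) sev1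
  -- _TAGS[sev]: sev is always in 0..7, so plain-index lookup is exact here
  pvTags.getD sev "--unk--"

-- ===== PRECONDITION & SPEC =====
def Spec_assign_unk (tok : String) (out : String) : Prop := out = assign_unk_alt tok
instance (tok : String) (out : String) : Decidable (Spec_assign_unk tok out) := by unfold Spec_assign_unk; infer_instance

-- ===== CLAIM (what is proved, stated in full; the proofs are below) =====
def Claim_equal_assign_unk : Prop := ∀ (tok : String), Dom_assign_unk tok → Spec_assign_unk tok (assign_unk tok)

-- ===== LEMMAS AND PROOFS =====

-- the character min-reduction equals the three ordered any-scans
lemma pv_rank_cons (c : Char) (b1 b2 b3 : Bool) :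
    min (pvCharRank c) (if b1 then 0 else if b2 then 1 else if b3 then 2 else 7)
    = (if (PySem.Chars.isdigit c || b1) then 0
       else if (decide (c ∈ pvPunct) || b2) then 1
       else if (PySem.Chars.isupper c || b3) then 2 else 7) := by
  cases hd : PySem.Chars.isdigit c <;>
    by_cases hp : c ∈ pvPunct <;>
      cases hu : PySem.Chars.isupper c <;>
        cases b1 <;> cases b2 <;> cases b3 <;>
          simp [pvCharRank, hd, hp, hu]

lemma pv_char_fold (l : List Char) (a : Nat) (ha : a ≤ 7) :
    l.foldl (fun sev c => min sev (pvCharRank c)) a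
    = min a (if l.any PySem.Chars.isdigit then 0
             else if l.any (fun c => decide (c ∈ pvPunct)) then 1
             else if l.any PySem.Chars.isupper then 2 else 7) := by
  induction l generalizing a with
  | nil => simp [Nat.min_def]; omega
  | cons c t ih =>
    rw [List.foldl_cons, ih (min a (pvCharRank c)) (le_trans (min_le_left _ _) ha),
      min_assoc, pv_rank_cons]
    simp [List.any_cons]

lemma pv_char_fold7 (l : List Char) :
    l.foldl (fun sev c => min sev (pvCharRank c)) 7
    = (if l.any PySem.Chars.isdigit then 0
       else if l.any (fun c => decide (c ∈ pvPunct)) then 1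
       else if l.any PySem.Chars.isupper then 2 else 7) := by
  rw [pv_char_fold l 7 (by norm_num)]
  split_ifs <;> decide

-- one constant-ranked suffix group min-reduces to its any
lemma pv_group_fold (tok : String) (xs : List String) (r a : Nat) :
    (xs.map (fun s => (s, r))).foldl
      (fun sev p => if PySem.Str.endswith tok p.1 then min sev p.2 else sev) a
    = if xs.any (fun s => PySem.Str.endswith tok s) then min a r else a := by
  induction xs generalizing a with
  | nil => simp
  | cons x t ih =>
    rw [List.map_cons, List.foldl_cons, List.any_cons]
    show (t.map (fun s => (s, r))).foldl _ (if PySem.Str.endswith tok x then min a r else a) = _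
    by_cases h : PySem.Str.endswith tok x = true
    · rw [if_pos h, ih, h]
      simp
    · rw [if_neg h, ih, Bool.eq_false_iff.mpr h, Bool.false_or]

-- ===== VERDICT (by name: the statement is the Claim_ definition above) =====
set_option maxHeartbeats 1600000 in
theorem assign_unk_spec : Claim_equal_assign_unk := by
  intro tok _
  show assign_unk tok = assign_unk_alt tok
  simp only [assign_unk, assign_unk_alt, pvSuffixRank, List.foldl_append,
    pv_char_fold7, pv_group_fold]
  by_cases h1 : tok.toList.any PySem.Chars.isdigit <;>
    by_cases h2 : tok.toList.any (fun c => decide (c ∈ pvPunct)) <;>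
      by_cases h3 : tok.toList.any PySem.Chars.isupper <;>
        by_cases s1 : pvNounSuffix.any (fun s => PySem.Str.endswith tok s) <;>
          by_cases s2 : pvVerbSuffix.any (fun s => PySem.Str.endswith tok s) <;>
            by_cases s3 : pvAdjSuffix.any (fun s => PySem.Str.endswith tok s) <;>
              by_cases s4 : pvAdvSuffix.any (fun s => PySem.Str.endswith tok s) <;>
                simp only [h1, h2, h3, s1, s2, s3, s4, Bool.false_eq_true, if_true, if_false] <;> rfl
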